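-- pv_equiv track=rewrite | github.com/HyeonIn/StudyNote | Algorithm/코딩역량인증제준비/etc/카카오2021기출/메뉴리뉴얼.py | solution
-- ===== SOURCE A (Python) =====
-- from itertools import combinations
--
-- def solution(orders, course):
--     course_dict = {}
--     for order in orders:
--         for i in course:
--             for o in combinations(sorted(list(order)), i):
--                 if o in course_dict:
--                     course_dict[o] += 1
--                 else:
--                     course_dict[o] = 1
--     max_list = [0, 0, 0, 0, 0, 0, 0, 0, 0, 0, 0]
--     for c in course:
--         max_order = 0
--         for i in course_dict.keys():
--             if len(i) == c and course_dict[i] != 1: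
--                 if course_dict[i] > max_order:
--                     max_order = course_dict[i]
--         max_list[c] = max_order
--
--     answer = []
--
--     for i in course_dict.keys():
--         if course_dict[i] == max_list[len(i)]:
--             answer.append("".join(i))
--
--     answer.sort()
--     return answer
-- ===== SOURCE B (Python) =====
-- from itertools import combinations
--
-- def solution(orders, course):
--     # Sort-then-scan instead of hash counting: flatten all combination strings,
--     # sort them, run-length-encode consecutive runs, then one pass for the per-size
--     # best repeated count; the answer falls out already in sorted order.
--     combos = []
--     for order in orders:
--         letters = sorted(order)
--         for r in course:
--             for t in combinations(letters, r):
--                 combos.append("".join(t))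
--     combos.sort()
--     groups = []
--     for s in combos:
--         if groups and groups[-1][0] == s:
--             groups[-1] = (s, groups[-1][1] + 1)
--         else:
--             groups.append((s, 1))
--     best = {}
--     for s, n in groups:
--         if n != 1 and n > best.get(len(s), 0):
--             best[len(s)] = n
--     return [s for s, n in groups if n == best.get(len(s), 0)]
-- ===== Notes on version B (the rewrite author's own statement) =====
-- stated objective: alternative
-- what changed: A's hash-dictionary counting with per-course-value full-dictionary max scans and a fixed 11-slot max_list is replaced by sort-then-scan: all combination strings are flattened into one list, sorted, run-length-encoded into (combo, count) groups, the best repeated count per size is taken in one pass over the groups, and the answer comes out already in sorted order with no final sort.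
import Mathlib
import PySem

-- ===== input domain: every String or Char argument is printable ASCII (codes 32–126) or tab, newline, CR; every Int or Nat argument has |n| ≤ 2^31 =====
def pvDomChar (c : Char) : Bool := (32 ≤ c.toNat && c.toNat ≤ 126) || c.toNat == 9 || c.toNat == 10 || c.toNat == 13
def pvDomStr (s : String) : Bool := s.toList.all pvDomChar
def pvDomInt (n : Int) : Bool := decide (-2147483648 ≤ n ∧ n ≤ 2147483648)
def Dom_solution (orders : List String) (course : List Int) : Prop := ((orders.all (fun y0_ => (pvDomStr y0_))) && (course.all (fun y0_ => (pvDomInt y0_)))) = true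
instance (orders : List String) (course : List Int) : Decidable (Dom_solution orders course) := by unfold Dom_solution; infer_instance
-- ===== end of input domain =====

-- B counts by sort-then-scan instead of a hash dictionary: it flattens all combination strings,
-- sorts them, run-length-encodes consecutive runs, takes the per-size best repeated count in one
-- pass, and emits the answer already in sorted order (objective: alternative).

-- ===== PORT A =====
-- itertools.combinations(xs, r) with a Python int r; exact for 0 ≤ r (r < 0 raises ValueError, excluded by Pre_)
def pyCombs (xs : List Char) (r : Int) : List (List Char) :=
  PySem.List.combinations xs r.toNat

-- Python list assignment ml[i] = v with negative-index wraparound; exact for -len ≤ i < len (else IndexError, excluded by Pre_)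
def pySetIdx (ml : List Int) (i : Int) (v : Int) : List Int :=
  ml.set (if i < 0 then i + ml.length else i).toNat v

def solution (orders : List String) (course : List Int) : List String :=
  let courseDict : PySem.Dict (List Char) Int :=
    orders.foldl (fun d order =>
      course.foldl (fun d i =>
        (pyCombs (PySem.List.sorted order.toList (fun x => x) false) i).foldl
          (fun d o =>
            match d.get? o with
            | some v => d.insert o (v + 1)
            | none   => d.insert o 1) d) d) PySem.Dict.empty
  let maxList : List Int :=
    course.foldl (fun ml c =>
      let maxOrder : Int :=
        courseDict.keys.foldl (fun m i =>
          if (i.length : Int) = c ∧ courseDict.getD i 0 ≠ 1 then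
            if courseDict.getD i 0 > m then courseDict.getD i 0 else m
          else m) 0
      pySetIdx ml c maxOrder) (List.replicate 11 0)
  let answer : List String :=
    courseDict.keys.foldl (fun ans i =>
      -- max_list[len(i)]: in range under Pre_ (key lengths are course values in [0,10]); default never read
      if courseDict.getD i 0 = PySem.List.pyGetD maxList (i.length : Int) 0 then ans ++ [String.ofList i]
      else ans) []
  PySem.List.sorted answer (fun x => x) false

-- ===== PORT B =====
-- the body of B's run-length loop: groups[-1] update / append of a fresh run
def rstep (gs : List (String × Int)) (s : String) : List (String × Int) :=
  match gs.getLast? with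
  | some last => if last.1 = s then gs.dropLast ++ [(s, last.2 + 1)] else gs ++ [(s, 1)]
  | none => gs ++ [(s, 1)]

def solution_alt (orders : List String) (course : List Int) : List String :=
  let combos : List String :=
    orders.foldl (fun acc order =>
      let letters := PySem.List.sorted order.toList (fun x => x) false
      course.foldl (fun acc r =>
        (pyCombs letters r).foldl (fun acc t => acc ++ [String.ofList t]) acc) acc) []
  let combosS := PySem.List.sorted combos (fun x => x) false
  let groups : List (String × Int) := combosS.foldl rstep []
  let best : PySem.Dict Int Int :=
    groups.foldl (fun b g =>
      if g.2 ≠ 1 ∧ g.2 > b.getD (PySem.Str.len g.1) 0 then b.insert (PySem.Str.len g.1) g.2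
      else b) PySem.Dict.empty
  groups.foldl (fun acc g =>
    if g.2 = best.getD (PySem.Str.len g.1) 0 then acc ++ [g.1] else acc) []

-- ===== PRECONDITION & SPEC =====
-- Pre_ admits exactly the inputs where A returns: all course values in [0,10], or (negative-index
-- wraparound case) empty orders with all course values in [-11,10]; outside, A raises
-- ValueError (negative r in combinations) or IndexError (max_list[c]).
def Pre_solution (orders : List String) (course : List Int) : Prop :=
  (∀ c ∈ course, 0 ≤ c ∧ c ≤ 10) ∨ (orders = [] ∧ ∀ c ∈ course, -11 ≤ c ∧ c ≤ 10)
instance (orders : List String) (course : List Int) : Decidable (Pre_solution orders course) := by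
  unfold Pre_solution; infer_instance

def pvWitness_solution : List String × List Int := (["ab", "ab", "abc"], [2, 3])

def Spec_solution (orders : List String) (course : List Int) (out : List String) : Prop := out = solution_alt orders course
instance (orders : List String) (course : List Int) (out : List String) : Decidable (Spec_solution orders course out) := by unfold Spec_solution; infer_instance

-- ===== CLAIM (what is proved, stated in full; the proofs are below) =====
def Claim_equal_solution : Prop := ∀ (orders : List String) (course : List Int), Dom_solution orders course → Pre_solution orders course → Spec_solution orders course (solution orders course)
-- ===== LEMMAS AND PROOFS =====

theorem dict_step_eq (d : PySem.Dict (List Char) Int) (o : List Char) :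
    (match d.get? o with
      | some v => d.insert o (v + 1)
      | none   => d.insert o 1) = d.modify o 0 (· + 1) := by
  have h1 : d.modify o 0 (· + 1) = d.insert o (d.getD o 0 + 1) := rfl
  cases h : d.get? o with
  | some v => rw [h1, PySem.Dict.getD_eq_get?_getD, h]; rfl
  | none => rw [h1, PySem.Dict.getD_eq_get?_getD, h]; rfl

theorem pyGetD_pySetIdx (ml : List Int) (x c v : Int) (hlen : ml.length = 11)
    (hx0 : 0 ≤ x) (hx10 : x ≤ 10) (hc0 : 0 ≤ c) (hc10 : c ≤ 10) :
    PySem.List.pyGetD (pySetIdx ml x v) c 0 = if c = x then v else PySem.List.pyGetD ml c 0 := by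
  have hlen' : (pySetIdx ml x v).length = 11 := by simp [pySetIdx, hlen]
  rw [PySem.List.pyGetD_eq_getElem _ _ hc0 (by omega), PySem.List.pyGetD_eq_getElem _ _ hc0 (by omega)]
  simp only [pySetIdx, if_neg (by omega : ¬ x < 0)]
  by_cases h : c = x
  · subst h; rw [List.getElem_set_self]; simp
  · rw [List.getElem_set_ne (by omega)]; simp [h]

theorem foldl_set_get (g : Int → Int) :
    ∀ (cs : List Int) (ml : List Int), (∀ x ∈ cs, 0 ≤ x ∧ x ≤ 10) → ml.length = 11 →
      ∀ c : Int, 0 ≤ c → c ≤ 10 →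
      PySem.List.pyGetD (cs.foldl (fun ml x => pySetIdx ml x (g x)) ml) c 0 =
        if c ∈ cs then g c else PySem.List.pyGetD ml c 0 := by
  intro cs
  induction cs with
  | nil => intro ml _ _ c _ _; simp
  | cons x cs ih =>
    intro ml hcs hlen c hc0 hc10
    have hx := hcs x (by simp)
    have hlen' : (pySetIdx ml x (g x)).length = 11 := by simp [pySetIdx, hlen]
    rw [List.foldl_cons, ih _ (fun y hy => hcs y (by simp [hy])) hlen' c hc0 hc10]
    by_cases hmem : c ∈ cs
    · simp [hmem]
    · rw [pyGetD_pySetIdx ml x c (g x) hlen hx.1 hx.2 hc0 hc10]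
      by_cases hcx : c = x
      · subst hcx; simp
      · simp [hcx, hmem]

theorem rstep_ne_nil (gs : List (String × Int)) (s : String) : rstep gs s ≠ [] := by
  unfold rstep
  cases h : gs.getLast? with
  | none => simp
  | some last => by_cases hl : last.1 = s <;> simp [hl]

theorem rstep_prefix (a b : List (String × Int)) (s : String) (hb : b ≠ []) :
    rstep (a ++ b) s = a ++ rstep b s := by
  unfold rstep
  rw [List.getLast?_append, List.dropLast_append, if_neg (by simp [hb])]
  cases h : b.getLast? with
  | none => exact absurd (List.getLast?_eq_none_iff.mp h) hb
  | some last =>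
    simp only [Option.some_or]
    by_cases hl : last.1 = s <;> simp [hl, List.append_assoc]

theorem foldl_rstep_prefix : ∀ (S : List String) (a b : List (String × Int)), b ≠ [] →
    S.foldl rstep (a ++ b) = a ++ S.foldl rstep b := by
  intro S
  induction S with
  | nil => intro a b _; rfl
  | cons s S ih =>
    intro a b hb
    rw [List.foldl_cons, List.foldl_cons, rstep_prefix a b s hb, ih a _ (rstep_ne_nil b s)]

theorem discard_discard {α : Type} [BEq α] (s : PySem.Set α) (x : α) :
    (s.discard x).discard x = s.discard x := by
  simp [PySem.Set.discard, List.filter_filter]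

theorem discard_eq_self {α : Type} [BEq α] [LawfulBEq α] (s : PySem.Set α) (x : α)
    (h : ∀ y ∈ s, y ≠ x) : s.discard x = s := by
  unfold PySem.Set.discard
  rw [List.filter_eq_self]
  intro y hy
  simpa using h y hy

theorem rle_aux : ∀ (S : List String) (k : String) (c : Int),
    S.Pairwise (· ≤ ·) → (∀ x ∈ S, k ≤ x) →
    S.foldl rstep [(k, c)] =
      (k, c + (S.count k : Int)) ::
        ((PySem.Set.ofList S).discard k).map (fun v => (v, (S.count v : Int))) := by
  intro S
  induction S with
  | nil => intro k c _ _; simp [PySem.Set.ofList_nil, PySem.Set.discard]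
  | cons x T ih =>
    intro k c hp hk
    rw [List.pairwise_cons] at hp
    obtain ⟨hxT, hpT⟩ := hp
    rw [List.foldl_cons]
    by_cases hxk : x = k
    · subst hxk
      have hstep : rstep [(x, c)] x = [(x, c + 1)] := by simp [rstep]
      rw [hstep, ih x (c + 1) hpT hxT, PySem.Set.ofList_cons]
      have hd : (PySem.Set.discard (x :: (PySem.Set.ofList T).discard x) x)
          = (PySem.Set.ofList T).discard x := by
        show List.filter _ _ = _
        rw [List.filter_cons_of_neg (by simp)]
        exact discard_discard _ x
      rw [hd, List.count_cons_self]
      congr 1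
      · congr 1
        push_cast; ring
      · apply List.map_congr_left
        intro v hv
        have hvne : v ≠ x := ((PySem.Set.mem_discard _ _ _).mp hv).2
        simp [hvne.symm]
    · have hkx : ∀ y ∈ x :: T, k < y := by
        intro y hy
        rcases List.mem_cons.mp hy with rfl | hyT
        · exact lt_of_le_of_ne (hk y (by simp)) (fun he => hxk he.symm)
        · exact lt_of_lt_of_le
            (lt_of_le_of_ne (hk x (by simp)) (fun he => hxk he.symm)) (hxT y hyT)
      have hkxne : ¬ k = x := fun he => hxk he.symm
      have hstep : rstep [(k, c)] x = [(k, c), (x, 1)] := by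
        simp [rstep, hkxne]
      rw [hstep, show [(k, c), (x, 1)] = [(k, c)] ++ [(x, 1)] from rfl,
        foldl_rstep_prefix T [(k, c)] [(x, 1)] (by simp), ih x 1 hpT hxT,
        PySem.Set.ofList_cons]
      have hknot : List.count k (x :: T) = 0 := by
        rw [List.count_eq_zero]
        intro hmem
        exact absurd rfl (ne_of_lt (hkx k hmem)).symm
      have hd : (PySem.Set.discard (x :: (PySem.Set.ofList T).discard x) k)
          = x :: (PySem.Set.ofList T).discard x := by
        apply discard_eq_self
        intro y hy
        rcases List.mem_cons.mp hy with rfl | hyT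
        · exact fun he => hxk he
        · have : y ∈ T := (PySem.Set.mem_ofList _ _).mp ((PySem.Set.mem_discard _ _ _).mp hyT).1
          exact (ne_of_lt (hkx y (by simp [this]))).symm
      rw [hd, hknot]
      simp only [List.cons_append, List.nil_append, List.map_cons, Nat.cast_zero, add_zero,
        List.count_cons_self]
      congr 1
      congr 1
      · congr 1
        push_cast; ring
      · apply List.map_congr_left
        intro v hv
        have hvne : v ≠ x := ((PySem.Set.mem_discard _ _ _).mp hv).2
        simp [hvne.symm]

theorem rle_sorted (S : List String) (hs : S.Pairwise (· ≤ ·)) :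
    S.foldl rstep [] = (PySem.Set.ofList S).map (fun v => (v, (S.count v : Int))) := by
  cases S with
  | nil => simp [PySem.Set.ofList_nil]
  | cons x T =>
    rw [List.pairwise_cons] at hs
    obtain ⟨hxT, hpT⟩ := hs
    rw [List.foldl_cons, show rstep [] x = [(x, 1)] by simp [rstep],
      rle_aux T x 1 hpT hxT, PySem.Set.ofList_cons, List.map_cons]
    rw [List.count_cons_self]
    congr 1
    · congr 1
      push_cast; ring
    · apply List.map_congr_left
      intro v hv
      have hvne : v ≠ x := ((PySem.Set.mem_discard _ _ _).mp hv).2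
      simp [hvne.symm]


theorem pairwise_ofList_le : ∀ (S : List String), S.Pairwise (· ≤ ·) →
    (PySem.Set.ofList S).Pairwise (· ≤ ·) := by
  intro S
  induction S with
  | nil => intro _; simp [PySem.Set.ofList_nil]
  | cons x T ih =>
    intro hp
    rw [List.pairwise_cons] at hp
    rw [PySem.Set.ofList_cons, List.pairwise_cons]
    constructor
    · intro v hv
      exact hp.1 v ((PySem.Set.mem_ofList _ _).mp ((PySem.Set.mem_discard _ _ _).mp hv).1)
    · exact List.Pairwise.sublist (List.filter_sublist) (ih hp.2)

theorem best_getD (ps : List (String × Int)) :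
    ∀ (b : PySem.Dict Int Int) (c : Int),
      (ps.foldl (fun b g =>
          if g.2 ≠ 1 ∧ g.2 > b.getD (PySem.Str.len g.1) 0 then b.insert (PySem.Str.len g.1) g.2
          else b) b).getD c 0
      = ps.foldl (fun m g =>
          if PySem.Str.len g.1 = c ∧ g.2 ≠ 1 then
            if g.2 > m then g.2 else m
          else m) (b.getD c 0) := by
  induction ps with
  | nil => intro b c; simp
  | cons p ps ih =>
    intro b c
    rw [List.foldl_cons, List.foldl_cons, ih]
    congr 1
    by_cases h2 : PySem.Str.len p.1 = c
    · rw [h2]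
      split_ifs with h1 h3 <;> simp_all [PySem.Dict.getD_insert_self]
    · have hne : c ≠ PySem.Str.len p.1 := fun he => h2 he.symm
      by_cases h1 : p.2 ≠ 1 ∧ p.2 > b.getD (PySem.Str.len p.1) 0
      · rw [if_pos h1, PySem.Dict.getD_insert, if_neg hne,
          if_neg (fun hc : _ ∧ _ => h2 hc.1)]
      · rw [if_neg h1, if_neg (fun hc : _ ∧ _ => h2 hc.1)]

theorem foldl_append_if_prop {α β : Type} (p : α → Prop) [DecidablePred p] (f : α → β) :
    ∀ (l : List α) (acc : List β),
      l.foldl (fun acc x => if p x then acc ++ [f x] else acc) acc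
        = acc ++ (l.filter (fun x => decide (p x))).map f := by
  intro l
  induction l with
  | nil => intro acc; simp
  | cons x l ih =>
    intro acc
    rw [List.foldl_cons]
    by_cases h : p x
    · rw [if_pos h, ih]; simp [h]
    · rw [if_neg h, ih]; simp [h]

theorem agree (orders : List String) (course : List Int)
    (h : ∀ c ∈ course, 0 ≤ c ∧ c ≤ 10) :
    solution orders course = solution_alt orders course := by
  unfold solution solution_alt
  simp only [dict_step_eq]
  rw [show (List.foldl (fun d order => List.foldl (fun d i =>
        List.foldl (fun d o => d.modify o 0 fun x => x + 1) d
          (pyCombs (PySem.List.sorted order.toList fun x => x) i)) d course)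
        PySem.Dict.empty orders)
      = PySem.Dict.counter (orders.flatMap fun order => course.flatMap fun r =>
          pyCombs (PySem.List.sorted order.toList fun x => x) r) from by
    rw [PySem.Dict.counter_eq_foldl]; simp only [List.foldl_flatMap]]
  rw [show (List.foldl (fun acc order => List.foldl (fun acc r =>
        List.foldl (fun acc t => acc ++ [String.ofList t]) acc
          (pyCombs (PySem.List.sorted order.toList fun x => x) r)) acc course) ([] : List String) orders)
      = (orders.flatMap fun order => course.flatMap fun r =>
          pyCombs (PySem.List.sorted order.toList fun x => x) r).map String.ofList from by
    simp only [PySem.List.foldl_append_singleton_eq_map, PySem.List.foldl_append_eq_flatMap,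
      List.nil_append, List.map_flatMap]]
  set L : List (List Char) := orders.flatMap fun order => course.flatMap fun r =>
      pyCombs (PySem.List.sorted order.toList fun x => x) r with hL
  set S : List String := PySem.List.sorted (L.map String.ofList) (fun x => x) false with hSdef
  have hSperm : S.Perm (L.map String.ofList) := PySem.List.sorted_perm _ _ _
  have hSpair : S.Pairwise (· ≤ ·) := PySem.List.sorted_pairwise _ _
  simp only [PySem.Dict.keys_counter, PySem.Dict.getD_counter]
  rw [rle_sorted S hSpair]
  simp only [best_getD, PySem.Dict.getD_empty]
  rw [foldl_append_if_prop, foldl_append_if_prop]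
  simp only [List.nil_append, List.filter_map, List.map_map, List.foldl_map,
    Function.comp_def]
  simp only [List.map_id']
  have hinj : Function.Injective String.ofList := fun a b hab => by
    have h2 := congrArg String.toList hab
    simpa using h2
  have hKperm : (PySem.Set.ofList S).Perm ((PySem.Set.ofList L).map String.ofList) := by
    rw [List.perm_ext_iff_of_nodup (PySem.Set.nodup_ofList _)
      (List.Nodup.map hinj (PySem.Set.nodup_ofList _))]
    intro s
    simp only [PySem.Set.mem_ofList, hSperm.mem_iff, List.mem_map]
  have hcnt : ∀ k : List Char, List.count (String.ofList k) S = List.count k L := by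
    intro k
    rw [hSperm.count_eq, List.count_map_of_injective _ _ hinj]
  have hmax : ∀ c : Int,
      (List.foldl (fun (m : Int) (v : String) =>
          if PySem.Str.len v = c ∧ (List.count v S : Int) ≠ 1 then
            if (List.count v S : Int) > m then (List.count v S : Int) else m
          else m) 0 (PySem.Set.ofList S))
      = (List.foldl (fun (m : Int) (i : List Char) =>
          if (i.length : Int) = c ∧ (List.count i L : Int) ≠ 1 then
            if (List.count i L : Int) > m then (List.count i L : Int) else m
          else m) 0 (PySem.Set.ofList L)) := by
    intro c
    have hrc : RightCommutative (fun (m : Int) (v : String) =>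
        if PySem.Str.len v = c ∧ (List.count v S : Int) ≠ 1 then
          if (List.count v S : Int) > m then (List.count v S : Int) else m
        else m) := ⟨by
      intro b a1 a2
      split_ifs <;> omega⟩
    rw [@List.Perm.foldl_eq _ _ _ _ _ hrc hKperm 0, List.foldl_map]
    apply PySem.List.foldl_congr_mem
    intro acc k hk
    simp [PySem.Str.len, hcnt k]
  have hlenfacts : ∀ k ∈ PySem.Set.ofList L,
      ((k.length : Int) ∈ course ∧ 0 ≤ (k.length : Int) ∧ (k.length : Int) ≤ 10) := by
    intro k hk
    rw [PySem.Set.mem_ofList] at hk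
    rw [hL] at hk
    obtain ⟨order, ho, hk2⟩ := List.mem_flatMap.mp hk
    obtain ⟨r, hr, hk3⟩ := List.mem_flatMap.mp hk2
    unfold pyCombs at hk3
    have hlen := PySem.List.length_of_mem_combinations hk3
    have h0 := (h r hr).1
    have h10 := (h r hr).2
    have heq : (k.length : Int) = r := by
      rw [hlen]
      exact Int.toNat_of_nonneg h0
    exact ⟨heq ▸ hr, by omega⟩
  refine PySem.List.sorted_id_eq_of_perm_of_pairwise _ _ ?_ ?_
  · refine List.Perm.trans (List.Perm.filter _ hKperm) ?_
    rw [List.filter_map]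
    refine List.Perm.of_eq (congrArg (List.map String.ofList) (List.filter_congr ?_))
    intro k hk
    obtain ⟨hmemc, h0, h10⟩ := hlenfacts k hk
    simp only [Function.comp_apply, decide_eq_decide]
    have e : PySem.Str.len (String.ofList k) = (k.length : Int) := by simp [PySem.Str.len]
    rw [hcnt k, e, hmax ((k.length : Int)),
      foldl_set_get _ course _ h (by simp) _ h0 h10, if_pos hmemc]
  · exact List.Pairwise.sublist List.filter_sublist (pairwise_ofList_le S hSpair)

theorem agree_nil (course : List Int) : solution [] course = solution_alt [] course := rfl

-- ===== VERDICT (by name: the statement is the Claim_ definition above) =====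
theorem solution_spec : Claim_equal_solution := by
  intro orders course _ hpre
  show solution orders course = solution_alt orders course
  rcases hpre with h | ⟨hnil, _⟩
  · exact agree orders course h
  · subst hnil; exact agree_nil course
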